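-- pv_equiv track=rewrite | github.com/vaibhav-malpani/AI-Gladiators | game/ai_agent.py | _generate_personality
-- ===== SOURCE A (Python) =====
-- def _generate_personality(prompt: str) -> str:
--     """Generate personality description"""
--     traits = []
--
--     if any(word in prompt for word in ["patient", "calm", "zen"]):
--         traits.append("patient and calculated")
--     if any(word in prompt for word in ["aggressive", "fierce"]):
--         traits.append("fierce and relentless")
--     if any(word in prompt for word in ["strategic", "tactical", "smart"]):
--         traits.append("highly strategic")
--     if any(word in prompt for word in ["defensive", "cautious"]):
--         traits.append("cautious defender")
--     if any(word in prompt for word in ["adaptive", "learn"]):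
--         traits.append("adaptive learner")
--
--     if not traits:
--         traits = ["balanced fighter", "versatile combatant"]
--
--     return ", ".join(traits[:3]).capitalize()
-- ===== SOURCE B (Python) =====
-- _KEYWORD_BIT = {
--     "patient": 1, "calm": 1, "zen": 1,
--     "aggressive": 2, "fierce": 2,
--     "strategic": 4, "tactical": 4, "smart": 4,
--     "defensive": 8, "cautious": 8,
--     "adaptive": 16, "learn": 16,
-- }
--
-- _TRAITS = [
--     "patient and calculated",
--     "fierce and relentless",
--     "highly strategic",
--     "cautious defender",
--     "adaptive learner",
-- ]
--
--
-- def _build_outputs():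
--     outs = []
--     for mask in range(32):
--         sel = [t for i, t in enumerate(_TRAITS) if mask >> i & 1][:3]
--         if not sel:
--             sel = ["balanced fighter", "versatile combatant"]
--         outs.append(", ".join(sel).capitalize())
--     return outs
--
--
-- _OUTPUTS = _build_outputs()
--
--
-- def _generate_personality(prompt: str) -> str:
--     """Generate personality description"""
--     mask = 0
--     for word, bit in _KEYWORD_BIT.items():
--         if word in prompt:
--             mask |= bit
--     return _OUTPUTS[mask]
-- ===== Notes on version B (the rewrite author's own statement) =====
-- stated objective: alternative
-- what changed: Replaces the five if/append blocks plus join/slice/capitalize per call by a single bitmask pass over a flat keyword-to-bit dictionary and one lookup into a precomputed 32-entry table of finished personality strings (truncation, default, join and capitalization all folded into the table at module load).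
import Mathlib
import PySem

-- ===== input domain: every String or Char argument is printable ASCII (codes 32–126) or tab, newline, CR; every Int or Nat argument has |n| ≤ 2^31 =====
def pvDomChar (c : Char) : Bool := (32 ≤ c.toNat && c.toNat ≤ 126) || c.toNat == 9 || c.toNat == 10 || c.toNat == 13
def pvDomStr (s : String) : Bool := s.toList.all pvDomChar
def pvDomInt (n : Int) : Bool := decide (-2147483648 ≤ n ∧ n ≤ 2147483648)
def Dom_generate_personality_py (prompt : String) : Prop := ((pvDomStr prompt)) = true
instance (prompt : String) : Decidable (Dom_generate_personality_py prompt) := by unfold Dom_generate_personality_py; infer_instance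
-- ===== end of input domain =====

-- B replaces A's per-call if/append blocks and string building by a bitmask over a flat
-- keyword→bit dictionary and a lookup into a 32-entry table precomputed once; same cost, alternative structure.

-- str.capitalize(): first char uppercased, rest lowered — exact on the ASCII domain
def pvCapitalize (s : String) : String :=
  match s.toList with
  | [] => s
  | c :: cs => String.ofList (PySem.Chars.upperChar c :: PySem.Chars.lower cs)

-- ===== PORT A =====
def generate_personality_py (prompt : String) : String :=
  let traits : List String := []
  let traits := if (["patient", "calm", "zen"].any fun word => PySem.Str.isIn word prompt)
                then traits ++ ["patient and calculated"] else traits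
  let traits := if (["aggressive", "fierce"].any fun word => PySem.Str.isIn word prompt)
                then traits ++ ["fierce and relentless"] else traits
  let traits := if (["strategic", "tactical", "smart"].any fun word => PySem.Str.isIn word prompt)
                then traits ++ ["highly strategic"] else traits
  let traits := if (["defensive", "cautious"].any fun word => PySem.Str.isIn word prompt)
                then traits ++ ["cautious defender"] else traits
  let traits := if (["adaptive", "learn"].any fun word => PySem.Str.isIn word prompt)
                then traits ++ ["adaptive learner"] else traits
  let traits := if traits = [] then ["balanced fighter", "versatile combatant"] else traits
  pvCapitalize (PySem.Str.join ", " (PySem.List.slice traits none (some 3)))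

-- ===== PORT B =====
def pvKeywordBit : List (String × Nat) :=
  [ ("patient", 1), ("calm", 1), ("zen", 1),
    ("aggressive", 2), ("fierce", 2),
    ("strategic", 4), ("tactical", 4), ("smart", 4),
    ("defensive", 8), ("cautious", 8),
    ("adaptive", 16), ("learn", 16) ]

def pvTraits : List String :=
  [ "patient and calculated", "fierce and relentless", "highly strategic",
    "cautious defender", "adaptive learner" ]

-- _build_outputs(): the 32 finished personality strings, indexed by the group bitmask
def pvOutputs : List String :=
  (List.range 32).map fun mask =>
    let sel := (((pvTraits.zipIdx).filter fun p => (mask >>> p.2) &&& 1 = 1).map Prod.fst).take 3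
    let sel := if sel.isEmpty then ["balanced fighter", "versatile combatant"] else sel
    pvCapitalize (PySem.Str.join ", " sel)

def generate_personality_py_alt (prompt : String) : String :=
  let mask := pvKeywordBit.foldl
    (fun m p => if PySem.Str.isIn p.1 prompt then m ||| p.2 else m) 0
  -- _OUTPUTS[mask]: mask < 32 always, so the plain in-range lookup is exact
  pvOutputs.getD mask ""

-- ===== PRECONDITION & SPEC =====
def Spec_generate_personality_py (prompt : String) (out : String) : Prop := out = generate_personality_py_alt prompt
instance (prompt : String) (out : String) : Decidable (Spec_generate_personality_py prompt out) := by unfold Spec_generate_personality_py; infer_instance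

-- ===== CLAIM (what is proved, stated in full; the proofs are below) =====
def Claim_equal_generate_personality_py : Prop := ∀ (prompt : String), Dom_generate_personality_py prompt → Spec_generate_personality_py prompt (generate_personality_py prompt)

-- ===== LEMMAS AND PROOFS =====

-- B's bitmask fold, expressed through the five group disjunctions
theorem pv_mask_eq (f : String → Bool) :
    pvKeywordBit.foldl (fun m p => if f p.1 then m ||| p.2 else m) 0 =
      ((if f "patient" || (f "calm" || f "zen") then 1 else 0) : Nat) |||
      (if f "aggressive" || f "fierce" then 2 else 0) |||
      (if f "strategic" || (f "tactical" || f "smart") then 4 else 0) |||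
      (if f "defensive" || f "cautious" then 8 else 0) |||
      (if f "adaptive" || f "learn" then 16 else 0) := by
  simp only [pvKeywordBit, List.foldl]
  generalize f "patient" = b01
  generalize f "calm" = b02
  generalize f "zen" = b03
  generalize f "aggressive" = b04
  generalize f "fierce" = b05
  generalize f "strategic" = b06
  generalize f "tactical" = b07
  generalize f "smart" = b08
  generalize f "defensive" = b09
  generalize f "cautious" = b10
  generalize f "adaptive" = b11
  generalize f "learn" = b12
  revert b01 b02 b03 b04 b05 b06 b07 b08 b09 b10 b11 b12
  decide

set_option maxHeartbeats 2000000 in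
-- ===== VERDICT (by name: the statement is the Claim_ definition above) =====
theorem generate_personality_py_spec : Claim_equal_generate_personality_py := by
  intro prompt _
  unfold Spec_generate_personality_py generate_personality_py generate_personality_py_alt
  rw [pv_mask_eq (fun w => PySem.Str.isIn w prompt)]
  simp only [List.any_cons, List.any_nil, Bool.or_false]
  generalize (PySem.Str.isIn "patient" prompt || (PySem.Str.isIn "calm" prompt || PySem.Str.isIn "zen" prompt)) = b1
  generalize (PySem.Str.isIn "aggressive" prompt || PySem.Str.isIn "fierce" prompt) = b2
  generalize (PySem.Str.isIn "strategic" prompt || (PySem.Str.isIn "tactical" prompt || PySem.Str.isIn "smart" prompt)) = b3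
  generalize (PySem.Str.isIn "defensive" prompt || PySem.Str.isIn "cautious" prompt) = b4
  generalize (PySem.Str.isIn "adaptive" prompt || PySem.Str.isIn "learn" prompt) = b5
  revert b1 b2 b3 b4 b5
  decide
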